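-- pv_equiv track=rewrite | github.com/JakeJeong/Hugeus-MLX-Studio | backend/core/runtime.py | _split_stop_strings
-- ===== SOURCE A (Python) =====
-- def _split_stop_strings(text: str, stop_strings: list[str]) -> tuple[str, str, bool]:
--     if not text or not stop_strings:
--         return text, "", False
--
--     earliest_index: int | None = None
--     matched_stop = ""
--     for stop in stop_strings:
--         index = text.find(stop)
--         if index == -1:
--             continue
--         if earliest_index is None or index < earliest_index:
--             earliest_index = index
--             matched_stop = stop
--
--     if earliest_index is not None:
--         return text[:earliest_index], "", bool(matched_stop)
--
--     holdback = 0
--     for stop in stop_strings: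
--         max_prefix = min(len(text), len(stop) - 1)
--         for prefix_length in range(max_prefix, 0, -1):
--             if text.endswith(stop[:prefix_length]):
--                 holdback = max(holdback, prefix_length)
--                 break
--
--     if holdback > 0:
--         return text[:-holdback], text[-holdback:], False
--     return text, "", False
-- ===== SOURCE B (Python) =====
-- def _split_stop_strings(text: str, stop_strings: list[str]) -> tuple[str, str, bool]:
--     if not text or not stop_strings:
--         return text, "", False
--
--     # single left-to-right scan: the first position where any stop string starts
--     for i in range(len(text)):
--         for stop in stop_strings:
--             if text.startswith(stop, i):
--                 return text[:i], "", stop != ""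
--
--     # no full match: largest h such that the last h chars are a proper prefix of some stop
--     cap = min(len(text), max(len(s) for s in stop_strings) - 1)
--     for h in range(cap, 0, -1):
--         suffix = text[-h:]
--         if any(len(s) > h and s.startswith(suffix) for s in stop_strings):
--             return text[:-h], text[-h:], False
--     return text, "", False
-- ===== Notes on version B (the rewrite author's own statement) =====
-- stated objective: alternative
-- what changed: Replaces A's per-stop full-text find scans and per-stop descending prefix loops by a single left-to-right position scan that stops at the first position where any stop string starts, plus one top-down holdback scan over suffix lengths bounded by the longest stop string.
import Mathlib
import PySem

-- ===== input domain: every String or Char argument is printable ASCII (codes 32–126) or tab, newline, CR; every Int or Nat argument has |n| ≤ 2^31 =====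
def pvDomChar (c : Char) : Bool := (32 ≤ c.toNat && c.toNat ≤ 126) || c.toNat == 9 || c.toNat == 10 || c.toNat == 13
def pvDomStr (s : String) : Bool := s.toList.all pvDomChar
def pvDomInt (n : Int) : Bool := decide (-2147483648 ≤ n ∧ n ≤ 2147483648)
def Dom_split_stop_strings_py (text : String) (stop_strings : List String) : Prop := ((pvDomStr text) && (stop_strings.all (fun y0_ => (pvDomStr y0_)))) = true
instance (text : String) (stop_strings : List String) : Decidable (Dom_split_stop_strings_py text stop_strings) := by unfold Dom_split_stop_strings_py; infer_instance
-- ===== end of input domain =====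

-- B replaces the per-stop find/suffix loops by one left-to-right position scan and one top-down holdback scan (alternative algorithm, similar cost).


-- ===== PORT A =====
-- inner loop "for prefix_length in range(max_prefix, 0, -1): … break" of A
def pvInnerA (t stop : List Char) (holdback : Int) : List Int → Int
  | [] => holdback
  | pl :: rest =>
      if PySem.Chars.endswith t (PySem.List.slice stop none (some pl)) then max holdback pl
      else pvInnerA t stop holdback rest

-- loop body of A's first loop: state = (earliest_index, matched_stop)
def pvStepA (t : List Char) (st : Option Int × List Char) (stop : List Char) : Option Int × List Char :=
  let index := PySem.Chars.find t stop
  if index = -1 then st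
  else match st.1 with
    | none => (some index, stop)
    | some e => if index < e then (some index, stop) else st

def split_stop_strings_py (text : String) (stop_strings : List String) : String × String × Bool :=
  let t := text.toList
  if t = [] ∨ stop_strings = [] then (text, "", false) else
  let stops := stop_strings.map String.toList
  let r := stops.foldl (pvStepA t) (none, [])
  match r.1 with
  | some e => (String.ofList (PySem.List.slice t none (some e)), "", decide (r.2 ≠ []))
  | none =>
    let holdback := stops.foldl (fun h stop =>
      let maxPrefix : Int := min (t.length : Int) ((stop.length : Int) - 1)
      pvInnerA t stop h (PySem.List.pyRange maxPrefix 0 (-1))) 0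
    if 0 < holdback then
      (String.ofList (PySem.List.slice t none (some (-holdback))),
       String.ofList (PySem.List.slice t (some (-holdback)) none), false)
    else (text, "", false)

-- ===== PORT B =====
-- B's position scan: first i with text.startswith(stop, i) for some stop (first such stop)
def pvScanB (stops : List String) : List Char → Nat → Option (Nat × List Char)
  | [], _ => none
  | c :: rest, i =>
      match stops.find? (fun stop => PySem.Chars.startswith (c :: rest) stop.toList) with
      | some stop => some (i, stop.toList)
      | none => pvScanB stops rest (i + 1)

-- B's holdback scan: first h (from cap down) whose length-h suffix is a proper prefix of some stop
def pvHoldB (t : List Char) (stops : List String) : List Int → Option Int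
  | [] => none
  | h :: rest =>
      if stops.any (fun s => decide ((h : Int) < (s.toList.length : Int)) &&
          PySem.Chars.startswith s.toList (PySem.List.slice t (some (-h)) none)) then some h
      else pvHoldB t stops rest

def split_stop_strings_py_alt (text : String) (stop_strings : List String) : String × String × Bool :=
  let t := text.toList
  if t = [] ∨ stop_strings = [] then (text, "", false) else
  match pvScanB stop_strings t 0 with
  | some (i, stop) => (String.ofList (PySem.List.slice t none (some (i : Int))), "", decide (stop ≠ []))
  | none =>
    let cap : Int := min (t.length : Int)
      (PySem.List.maxD (stop_strings.map (fun s => (s.toList.length : Int))) id 0 - 1)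
    match pvHoldB t stop_strings (PySem.List.pyRange cap 0 (-1)) with
    | some h => (String.ofList (PySem.List.slice t none (some (-h))),
                 String.ofList (PySem.List.slice t (some (-h)) none), false)
    | none => (text, "", false)

-- ===== PRECONDITION & SPEC =====
def Spec_split_stop_strings_py (text : String) (stop_strings : List String) (out : String × String × Bool) : Prop := out = split_stop_strings_py_alt text stop_strings
instance (text : String) (stop_strings : List String) (out : String × String × Bool) : Decidable (Spec_split_stop_strings_py text stop_strings out) := by unfold Spec_split_stop_strings_py; infer_instance

-- ===== CLAIM (what is proved, stated in full; the proofs are below) =====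
def Claim_equal_split_stop_strings_py : Prop := ∀ (text : String) (stop_strings : List String), Dom_split_stop_strings_py text stop_strings → Spec_split_stop_strings_py text stop_strings (split_stop_strings_py text stop_strings)

-- ===== LEMMAS AND PROOFS =====

-- descending Int list [n, n-1, ..., 1] used to reason about range(n, 0, -1)
def pvDesc : Nat → List Int
  | 0 => []
  | n + 1 => ((n : Int) + 1) :: pvDesc n

theorem pvRange_desc (n : Nat) : PySem.List.pyRange (n : Int) 0 (-1) = pvDesc n := by
  have key : ∀ m : Nat, List.map (fun k : Nat => (m : Int) + -1 * (k : Int)) (List.range m) = pvDesc m := by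
    intro m
    induction m with
    | zero => rfl
    | succ p ih =>
      rw [List.range_succ_eq_map, List.map_cons, List.map_map, pvDesc]
      rw [List.cons.injEq]
      refine ⟨by push_cast; ring, ?_⟩
      rw [← ih]
      apply List.map_congr_left
      intro a _
      simp only [Function.comp_apply]
      push_cast; ring
  rw [PySem.List.pyRange]
  rcases Nat.eq_zero_or_pos n with h | h
  · subst h; rfl
  · have h0 : ¬ ((-1 : Int) = 0) := by norm_num
    simp only [if_neg h0]
    have h1 : ¬ (0 < (-1:Int)) := by norm_num
    simp only [if_neg h1]
    have hpos : (0:Int) < n := by exact_mod_cast h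
    simp only [if_pos hpos]
    have h2 : (((n:Int) - 0 + - -1 - 1) / - -1).toNat = n := by norm_num
    rw [h2]
    exact key n

theorem pvRange_desc_nonpos (m : Int) (h : m ≤ 0) : PySem.List.pyRange m 0 (-1) = [] := by
  rw [PySem.List.pyRange]
  have h0 : ¬ ((-1 : Int) = 0) := by norm_num
  simp only [if_neg h0]
  have h1 : ¬ (0 < (-1:Int)) := by norm_num
  simp only [if_neg h1]
  by_cases hm : 0 < m
  · omega
  · simp [if_neg hm]

def pvBest (t : List Char) : List (List Char) → Option Int × List Char
  | [] => (none, [])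
  | c :: l =>
    let i := PySem.Chars.find t c
    let r := pvBest t l
    if i = -1 then r
    else match r.1 with
      | none => (some i, c)
      | some e => if i ≤ e then (some i, c) else r

theorem pvFoldA_some (t : List Char) (l : List (List Char)) (e : Int) (m : List Char) :
    l.foldl (pvStepA t) (some e, m) =
      match (pvBest t l).1 with
      | none => (some e, m)
      | some e' => if e' < e then pvBest t l else (some e, m) := by
  induction l generalizing e m with
  | nil => simp [pvBest]
  | cons c l ih =>
    rw [List.foldl_cons, pvBest]
    simp only [pvStepA]
    by_cases h1 : PySem.Chars.find t c = -1
    · rw [if_pos h1]; simp only [if_pos h1]; exact ih e m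
    · rw [if_neg h1]; simp only [if_neg h1]
      by_cases h2 : PySem.Chars.find t c < e
      · simp only [if_pos h2]
        rw [ih]
        rcases hr : (pvBest t l).1 with _ | e'
        · simp only []
          by_cases h3 : PySem.Chars.find t c < e <;> simp [h2]
        · simp only [hr]
          by_cases h4 : PySem.Chars.find t c ≤ e'
          · rw [if_pos h4]
            have : ¬ e' < PySem.Chars.find t c := by omega
            rw [if_neg this]
            simp [h2]
          · rw [if_neg h4]
            have h5 : e' < PySem.Chars.find t c := by omega
            rw [if_pos h5]
            have h6 : e' < e := by omega
            have : (pvBest t l) = ((pvBest t l).1, (pvBest t l).2) := rfl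
            rw [this, hr]
            simp [h6]
      · simp only [if_neg h2]
        rw [ih]
        rcases hr : (pvBest t l).1 with _ | e'
        · simp only [hr]
          rw [if_neg h2]
        · simp only [hr]
          by_cases h4 : PySem.Chars.find t c ≤ e'
          · rw [if_pos h4]
            have h6 : ¬ (PySem.Chars.find t c < e) := h2
            simp only [if_neg h6]
            rw [if_neg (by omega : ¬ e' < e)]
          · rw [if_neg h4]
            have : (pvBest t l) = ((pvBest t l).1, (pvBest t l).2) := rfl
            rw [this, hr]

theorem pvFoldA_eq_best (t : List Char) (l : List (List Char)) :
    l.foldl (pvStepA t) (none, []) = pvBest t l := by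
  induction l with
  | nil => simp [pvBest]
  | cons c l ih =>
    rw [List.foldl_cons, pvBest]
    simp only [pvStepA]
    by_cases h1 : PySem.Chars.find t c = -1
    · rw [if_pos h1]; simp only [if_pos h1]
      exact ih
    · rw [if_neg h1]; simp only [if_neg h1]
      rw [pvFoldA_some]
      rcases hr : (pvBest t l).1 with _ | e'
      · simp
      · simp only [hr]
        by_cases h4 : PySem.Chars.find t c ≤ e'
        · rw [if_pos h4]
          have : ¬ e' < PySem.Chars.find t c := by omega
          rw [if_neg this]
        · rw [if_neg h4]
          have h5 : e' < PySem.Chars.find t c := by omega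
          rw [if_pos h5]

theorem pvBest_none (t : List Char) (l : List (List Char)) :
    (pvBest t l).1 = none ↔ ∀ c ∈ l, PySem.Chars.find t c = -1 := by
  induction l with
  | nil => simp [pvBest]
  | cons c l ih =>
    rw [pvBest]
    by_cases h1 : PySem.Chars.find t c = -1
    · rw [if_pos h1, ih]
      constructor
      · intro H c' hc'
        rcases List.mem_cons.mp hc' with h' | h'
        · subst h'; exact h1
        · exact H c' h'
      · intro H c' hc'
        exact H c' (List.mem_cons_of_mem _ hc')
    · rw [if_neg h1]
      constructor
      · intro H
        exfalso
        rcases hr : (pvBest t l).1 with _ | e'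
        · simp only [hr] at H; simp at H
        · simp only [hr] at H
          by_cases h4 : PySem.Chars.find t c ≤ e'
          · simp [h4] at H
          · simp [h4, hr] at H
      · intro H
        exact absurd (H c (List.mem_cons_self)) h1

theorem pvBest_some (t : List Char) (l : List (List Char)) (e : Int) (m : List Char)
    (h : pvBest t l = (some e, m)) :
    e ≠ -1 ∧ PySem.Chars.find t m = e ∧ m ∈ l ∧
    (∀ c ∈ l, PySem.Chars.find t c = -1 ∨ e ≤ PySem.Chars.find t c) ∧
    l.find? (fun c => decide (PySem.Chars.find t c = e)) = some m := by
  induction l generalizing e m with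
  | nil => simp [pvBest] at h
  | cons c l ih =>
    rw [pvBest] at h
    by_cases h1 : PySem.Chars.find t c = -1
    · rw [if_pos h1] at h
      obtain ⟨a0, a1, a2, a3, a4⟩ := ih e m h
      refine ⟨a0, a1, List.mem_cons_of_mem _ a2, ?_, ?_⟩
      · intro c' hc'
        rcases List.mem_cons.mp hc' with h' | h'
        · subst h'; exact Or.inl h1
        · exact a3 c' h'
      · exact (List.find?_cons_of_neg (p := fun x => decide (PySem.Chars.find t x = e))
          (by simp only [decide_eq_true_eq]; omega)).trans a4
    · rw [if_neg h1] at h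
      rcases hr : (pvBest t l).1 with _ | e'
      · simp only [hr] at h
        rw [Prod.mk.injEq] at h
        obtain ⟨h5, h6⟩ := h
        have he := Option.some.inj h5
        subst he; subst h6
        have hall := (pvBest_none t l).mp hr
        refine ⟨h1, rfl, List.mem_cons_self, ?_, ?_⟩
        · intro c' hc'
          rcases List.mem_cons.mp hc' with h' | h'
          · subst h'; exact Or.inr le_rfl
          · exact Or.inl (hall c' h')
        · rw [List.find?_cons_of_pos (by simp)]
      · simp only [hr] at h
        by_cases h4 : PySem.Chars.find t c ≤ e'
        · rw [if_pos h4] at h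
          rw [Prod.mk.injEq] at h
          obtain ⟨h5, h6⟩ := h
          have he := Option.some.inj h5
          subst he; subst h6
          have hpair : pvBest t l = (some e', (pvBest t l).2) := by
            rw [← hr]
          obtain ⟨b0, b1, b2, b3, b4⟩ := ih e' (pvBest t l).2 hpair
          refine ⟨h1, rfl, List.mem_cons_self, ?_, ?_⟩
          · intro c' hc'
            rcases List.mem_cons.mp hc' with h' | h'
            · subst h'; exact Or.inr le_rfl
            · rcases b3 c' h' with hx | hx
              · exact Or.inl hx
              · exact Or.inr (le_trans h4 hx)
          · rw [List.find?_cons_of_pos (by simp)]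
        · rw [if_neg h4] at h
          have he1 : (pvBest t l).1 = some e := by rw [h]
          have he : e' = e := by rw [hr] at he1; exact Option.some.inj he1
          obtain ⟨b0, b1, b2, b3, b4⟩ := ih e m h
          refine ⟨b0, b1, List.mem_cons_of_mem _ b2, ?_, ?_⟩
          · intro c' hc'
            rcases List.mem_cons.mp hc' with h' | h'
            · subst h'; right; omega
            · exact b3 c' h'
          · exact (List.find?_cons_of_neg (p := fun x => decide (PySem.Chars.find t x = e))
              (by simp only [decide_eq_true_eq]; omega)).trans b4

theorem pvInnerA_spec (t c : List Char) (h0 : Int) (n : Nat) :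
    h0 ≤ pvInnerA t c h0 (pvDesc n) ∧
    (pvInnerA t c h0 (pvDesc n) = h0 ∨
      (0 < pvInnerA t c h0 (pvDesc n) ∧ (pvInnerA t c h0 (pvDesc n)).toNat ≤ n ∧
        PySem.Chars.endswith t (PySem.List.slice c none (some (pvInnerA t c h0 (pvDesc n)))) = true)) ∧
    (∀ j : Nat, 1 ≤ j → j ≤ n →
      PySem.Chars.endswith t (PySem.List.slice c none (some (j : Int))) = true →
      (j : Int) ≤ pvInnerA t c h0 (pvDesc n)) := by
  induction n with
  | zero => refine ⟨le_refl _, Or.inl rfl, ?_⟩; intro j hj1 hj2 _; omega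
  | succ p ih =>
    rw [pvDesc, pvInnerA]
    by_cases hP : PySem.Chars.endswith t (PySem.List.slice c none (some ((p:Int)+1))) = true
    · rw [if_pos hP]
      refine ⟨le_max_left _ _, ?_, ?_⟩
      · by_cases hc : h0 ≤ (p:Int)+1
        · right
          rw [max_eq_right hc]
          refine ⟨by omega, by omega, hP⟩
        · left; rw [max_eq_left (by omega)]
      · intro j hj1 hj2 _
        have : (j:Int) ≤ (p:Int)+1 := by omega
        exact le_trans this (le_max_right _ _)
    · rw [if_neg hP]
      obtain ⟨i1, i2, i3⟩ := ih
      refine ⟨i1, ?_, ?_⟩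
      · rcases i2 with e | ⟨a2, b2, c2⟩
        · exact Or.inl e
        · exact Or.inr ⟨a2, by omega, c2⟩
      intro j hj1 hj2 hPj
      rcases Nat.lt_or_ge j (p+1) with hlt | hge
      · exact i3 j hj1 (by omega) hPj
      · exfalso
        have : j = p + 1 := by omega
        subst this
        apply hP
        have : ((p+1 : Nat) : Int) = (p:Int)+1 := by push_cast; ring
        rw [← this]; exact hPj

theorem pvHoldB_some (t : List Char) (stops : List String) (n : Nat) (h : Int)
    (hh : pvHoldB t stops (pvDesc n) = some h) :
    0 < h ∧ h.toNat ≤ n ∧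
    (stops.any (fun s => decide ((h : Int) < (s.toList.length : Int)) &&
        PySem.Chars.startswith s.toList (PySem.List.slice t (some (-h)) none)) = true) ∧
    (∀ j : Nat, h.toNat < j → j ≤ n →
      stops.any (fun s => decide ((j : Int) < (s.toList.length : Int)) &&
        PySem.Chars.startswith s.toList (PySem.List.slice t (some (-(j:Int))) none)) = false) := by
  induction n with
  | zero => simp [pvDesc, pvHoldB] at hh
  | succ p ih =>
    rw [pvDesc, pvHoldB] at hh
    by_cases hc : stops.any (fun s => decide (((p:Int)+1) < (s.toList.length : Int)) &&
        PySem.Chars.startswith s.toList (PySem.List.slice t (some (-((p:Int)+1))) none)) = true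
    · rw [if_pos hc] at hh
      have he : h = (p:Int)+1 := by exact (Option.some_injective _ hh).symm
      subst he
      refine ⟨by omega, by omega, hc, ?_⟩
      intro j hj1 hj2
      omega
    · rw [if_neg hc] at hh
      obtain ⟨a1, a2, a3, a4⟩ := ih hh
      refine ⟨a1, by omega, a3, ?_⟩
      intro j hj1 hj2
      rcases Nat.lt_or_ge j (p+1) with hlt | hge
      · exact a4 j hj1 (by omega)
      · have : j = p + 1 := by omega
        subst this
        rw [Bool.eq_false_iff, Ne]
        intro hco
        apply hc
        have hcast : ((p+1 : Nat) : Int) = (p:Int)+1 := by push_cast; ring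
        rw [← hcast]; exact hco

theorem pvHoldB_none (t : List Char) (stops : List String) (n : Nat)
    (hh : pvHoldB t stops (pvDesc n) = none) :
    ∀ j : Nat, 1 ≤ j → j ≤ n →
      stops.any (fun s => decide ((j : Int) < (s.toList.length : Int)) &&
        PySem.Chars.startswith s.toList (PySem.List.slice t (some (-(j:Int))) none)) = false := by
  induction n with
  | zero => intro j h1 h2; omega
  | succ p ih =>
    rw [pvDesc, pvHoldB] at hh
    by_cases hc : stops.any (fun s => decide (((p:Int)+1) < (s.toList.length : Int)) &&
        PySem.Chars.startswith s.toList (PySem.List.slice t (some (-((p:Int)+1))) none)) = true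
    · rw [if_pos hc] at hh; exact absurd hh (by simp)
    · rw [if_neg hc] at hh
      intro j h1 h2
      rcases Nat.lt_or_ge j (p+1) with hlt | hge
      · exact ih hh j h1 (by omega)
      · have : j = p + 1 := by omega
        subst this
        rw [Bool.eq_false_iff, Ne]
        intro hco
        apply hc
        have hcast : ((p+1 : Nat) : Int) = (p:Int)+1 := by push_cast; ring
        rw [← hcast]; exact hco

theorem pvScanB_aux (stops : List String) (t : List Char) (d : Nat) :
    ∀ k, k + d = t.length →
    (pvScanB stops (t.drop k) k = none ↔
      ∀ j, k ≤ j → j < t.length → ∀ st ∈ stops, ¬ st.toList <+: t.drop j) ∧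
    (∀ i m, pvScanB stops (t.drop k) k = some (i, m) →
      k ≤ i ∧ i < t.length ∧
      (stops.find? (fun st => PySem.Chars.startswith (t.drop i) st.toList)).map String.toList = some m ∧
      (∀ j, k ≤ j → j < i → ∀ st ∈ stops, ¬ st.toList <+: t.drop j)) := by
  induction d with
  | zero =>
    intro k hk
    have hnil : t.drop k = [] := List.drop_eq_nil_of_le (by omega)
    rw [hnil]
    constructor
    · rw [pvScanB]
      constructor
      · intro _ j hj1 hj2 st hst
        omega
      · intro _; rfl
    · intro i m hsome
      rw [pvScanB] at hsome
      exact absurd hsome (by simp)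
  | succ d ih =>
    intro k hk
    have hlt : k < t.length := by omega
    rw [List.drop_eq_getElem_cons hlt, pvScanB, ← List.drop_eq_getElem_cons hlt]
    obtain ⟨ihn, ihs⟩ := ih (k+1) (by omega)
    rcases hf : stops.find? (fun stop => PySem.Chars.startswith (t.drop k) stop.toList) with _ | stop
    · rw [hf]
      rw [List.find?_eq_none] at hf
      constructor
      · rw [ihn]
        constructor
        · intro H j hj1 hj2 st hst hpre
          rcases Nat.eq_or_lt_of_le hj1 with he | hl
          · subst he
            exact hf st hst (by rw [PySem.Chars.startswith_iff]; exact hpre)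
          · exact H j hl hj2 st hst hpre
        · intro H j hj1 hj2 st hst
          exact H j (by omega) hj2 st hst
      · intro i m hsome
        obtain ⟨a1, a2, a3, a4⟩ := ihs i m hsome
        refine ⟨by omega, a2, a3, ?_⟩
        intro j hj1 hj2 st hst hpre
        rcases Nat.eq_or_lt_of_le hj1 with he | hl
        · subst he
          exact hf st hst (by rw [PySem.Chars.startswith_iff]; exact hpre)
        · exact a4 j hl hj2 st hst hpre
    · rw [hf]
      constructor
      · constructor
        · intro habs; exact absurd habs (by simp)
        · intro H
          exfalso
          have hp := List.find?_some hf
          rw [PySem.Chars.startswith_iff] at hp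
          exact H k le_rfl hlt stop (List.mem_of_find?_eq_some hf) hp
      · intro i m hsome
        have hi : i = k ∧ m = stop.toList := by
          rw [Option.some.injEq, Prod.mk.injEq] at hsome
          exact ⟨hsome.1.symm, hsome.2.symm⟩
        obtain ⟨hik, hms⟩ := hi
        subst hik; subst hms
        refine ⟨le_rfl, hlt, ?_, ?_⟩
        · rw [hf]; rfl
        · intro j hj1 hj2 st hst
          omega


theorem pvSliceNegFrom (xs : List Char) (h : Nat) (h1 : 1 ≤ h) (h2 : h ≤ xs.length) :
    PySem.List.slice xs (some (-(h:Int))) none = xs.drop (xs.length - h) := by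
  simp only [PySem.List.slice]
  rw [List.take_of_length_le]
  congr 1
  · simp only [PySem.List.clampIdx]; split_ifs <;> omega
  · simp only [PySem.List.clampIdx]; split_ifs <;> simp

theorem pvCond_iff (t c : List Char) (h : Nat) (h1 : 1 ≤ h) (h2 : h ≤ t.length) (h3 : h < c.length) :
    (PySem.Chars.endswith t (PySem.List.slice c none (some (h : Int))) = true) ↔
    (PySem.Chars.startswith c (PySem.List.slice t (some (-(h:Int))) none) = true) := by
  rw [PySem.List.slice_to c (by positivity), pvSliceNegFrom t h h1 h2]
  rw [PySem.Chars.endswith_iff, PySem.Chars.startswith_iff]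
  have ht : (h:Int).toNat = h := Int.toNat_natCast h
  rw [ht]
  have hlt : (List.take h c).length = h := by simp; omega
  have hld : (List.drop (t.length - h) t).length = h := by simp; omega
  constructor
  · intro hs
    rw [List.prefix_iff_eq_take, hld]
    rw [List.suffix_iff_eq_drop, hlt] at hs
    exact hs.symm
  · intro hp
    rw [List.suffix_iff_eq_drop, hlt]
    rw [List.prefix_iff_eq_take, hld] at hp
    exact hp.symm

theorem pvLeMaxD (l : List Int) (x : Int) (h : x ∈ l) : x ≤ PySem.List.maxD l id 0 := by
  have hne : l ≠ [] := by rintro rfl; simp at h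
  have h1 := PySem.List.max?_eq_some_maxD (xs := l) (key := (id : Int → Int)) (d := 0) hne
  simpa using PySem.List.max?_isMax h1 x h


theorem pvFindCongr (l : List (List Char)) (p q : List Char → Bool)
    (h : ∀ c ∈ l, p c = q c) : l.find? p = l.find? q := by
  induction l with
  | nil => rfl
  | cons c l ih =>
    rw [List.find?_cons, List.find?_cons, h c List.mem_cons_self,
      ih (fun c' hc' => h c' (List.mem_cons_of_mem _ hc'))]

theorem pvAny_iff (t : List Char) (stops : List String) (h : Nat)
    (h1 : 1 ≤ h) (h2 : h ≤ t.length) :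
    (stops.any (fun s => decide ((h : Int) < (s.toList.length : Int)) &&
        PySem.Chars.startswith s.toList (PySem.List.slice t (some (-(h:Int))) none)) = true) ↔
    ∃ c ∈ stops.map String.toList, h < c.length ∧
      PySem.Chars.endswith t (PySem.List.slice c none (some (h:Int))) = true := by
  rw [List.any_eq_true]
  constructor
  · rintro ⟨s, hs, hcond⟩
    rw [Bool.and_eq_true, decide_eq_true_eq] at hcond
    have hlen : h < s.toList.length := by exact_mod_cast hcond.1
    exact ⟨s.toList, List.mem_map_of_mem hs, hlen,
      (pvCond_iff t s.toList h h1 h2 hlen).mpr hcond.2⟩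
  · rintro ⟨c, hc, hlen, hend⟩
    obtain ⟨s, hs, rfl⟩ := List.mem_map.mp hc
    refine ⟨s, hs, ?_⟩
    rw [Bool.and_eq_true, decide_eq_true_eq]
    exact ⟨by exact_mod_cast hlen, (pvCond_iff t s.toList h h1 h2 hlen).mp hend⟩

theorem pvFoldHold_spec (t : List Char) (L : List (List Char)) (h0 : Int) (hh0 : 0 ≤ h0) :
    h0 ≤ L.foldl (fun h stop => pvInnerA t stop h
        (PySem.List.pyRange (min (t.length : Int) ((stop.length : Int) - 1)) 0 (-1))) h0 ∧
    (L.foldl (fun h stop => pvInnerA t stop h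
        (PySem.List.pyRange (min (t.length : Int) ((stop.length : Int) - 1)) 0 (-1))) h0 = h0 ∨
      (0 < L.foldl (fun h stop => pvInnerA t stop h
          (PySem.List.pyRange (min (t.length : Int) ((stop.length : Int) - 1)) 0 (-1))) h0 ∧
       ∃ c ∈ L, L.foldl (fun h stop => pvInnerA t stop h
          (PySem.List.pyRange (min (t.length : Int) ((stop.length : Int) - 1)) 0 (-1))) h0 ≤
            min (t.length : Int) ((c.length : Int) - 1) ∧
         PySem.Chars.endswith t (PySem.List.slice c none
          (some (L.foldl (fun h stop => pvInnerA t stop h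
            (PySem.List.pyRange (min (t.length : Int) ((stop.length : Int) - 1)) 0 (-1))) h0))) = true)) ∧
    (∀ c ∈ L, ∀ j : Nat, 1 ≤ j → (j : Int) ≤ min (t.length : Int) ((c.length : Int) - 1) →
      PySem.Chars.endswith t (PySem.List.slice c none (some (j:Int))) = true →
      (j : Int) ≤ L.foldl (fun h stop => pvInnerA t stop h
        (PySem.List.pyRange (min (t.length : Int) ((stop.length : Int) - 1)) 0 (-1))) h0) := by
  induction L generalizing h0 with
  | nil =>
    refine ⟨le_refl _, Or.inl rfl, ?_⟩
    intro c hc; exact absurd hc (List.not_mem_nil)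
  | cons c L ih =>
    rw [List.foldl_cons]
    by_cases hM : min (t.length : Int) ((c.length : Int) - 1) ≤ 0
    · rw [pvRange_desc_nonpos _ hM]
      have hstep : pvInnerA t c h0 [] = h0 := rfl
      rw [hstep]
      obtain ⟨g1, g2, g3⟩ := ih h0 hh0
      refine ⟨g1, ?_, ?_⟩
      · rcases g2 with ge | ⟨gpos, c', hc', gb, gP⟩
        · exact Or.inl ge
        · exact Or.inr ⟨gpos, c', List.mem_cons_of_mem _ hc', gb, gP⟩
      · intro c' hc' j hj1 hj2 hjP
        rcases List.mem_cons.mp hc' with h' | h'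
        · subst h'; omega
        · exact g3 c' h' j hj1 hj2 hjP
    · have hM' : 0 < min (t.length : Int) ((c.length : Int) - 1) := by omega
      have hMc : ((min (t.length : Int) ((c.length : Int) - 1)).toNat : Int)
          = min (t.length : Int) ((c.length : Int) - 1) := Int.toNat_of_nonneg (by omega)
      rw [← hMc, pvRange_desc]
      obtain ⟨i1, i2, i3⟩ := pvInnerA_spec t c h0 (min (t.length : Int) ((c.length : Int) - 1)).toNat
      set h1 := pvInnerA t c h0 (pvDesc (min (t.length : Int) ((c.length : Int) - 1)).toNat) with hh1
      obtain ⟨g1, g2, g3⟩ := ih h1 (by omega)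
      refine ⟨le_trans i1 g1, ?_, ?_⟩
      · rcases g2 with ge | ⟨gpos, c', hc', gb, gP⟩
        · rw [ge]
          rcases i2 with ie | ⟨ipos, ib, iP⟩
          · exact Or.inl ie
          · refine Or.inr ⟨ipos, c, List.mem_cons_self, by omega, iP⟩
        · exact Or.inr ⟨gpos, c', List.mem_cons_of_mem _ hc', gb, gP⟩
      · intro c' hc' j hj1 hj2 hjP
        rcases List.mem_cons.mp hc' with h' | h'
        · subst h'
          exact le_trans (i3 j hj1 (by omega) hjP) g1
        · exact g3 c' h' j hj1 hj2 hjP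

theorem pvBridge1 (stops : List String) (t : List Char) (ht : t ≠ []) :
    ((pvBest t (stops.map String.toList)).1 = none → pvScanB stops t 0 = none) ∧
    (∀ e m, pvBest t (stops.map String.toList) = (some e, m) →
      pvScanB stops t 0 = some (e.toNat, m) ∧ ((e.toNat : Int) = e)) := by
  obtain ⟨iffnone, hsome⟩ := pvScanB_aux stops t t.length 0 (by omega)
  rw [List.drop_zero] at iffnone hsome
  constructor
  · intro hb
    have hall := (pvBest_none t (stops.map String.toList)).mp hb
    apply iffnone.mpr
    intro j _ hj st hst hpre
    have hfm := hall st.toList (List.mem_map_of_mem hst)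
    rw [PySem.Chars.find_eq_neg_one_iff] at hfm
    exact hfm (hpre.isInfix.trans (List.drop_suffix j t).isInfix)
  · intro e m hpair
    obtain ⟨hne, hfm, hmem, hbound, hfind⟩ := pvBest_some t (stops.map String.toList) e m hpair
    have he0 : 0 ≤ e := by
      have := PySem.Chars.neg_one_le_find t m
      omega
    have hfm0 : 0 ≤ PySem.Chars.find t m := by rw [hfm]; exact he0
    obtain ⟨hpre, hmin⟩ := PySem.Chars.find_spec hfm0
    rw [hfm] at hpre hmin
    obtain ⟨st0, hst0, hst0e⟩ := List.mem_map.mp hmem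
    have hlt : e.toNat < t.length := by
      by_cases hm : m = []
      · subst hm
        have : PySem.Chars.find t [] = 0 := PySem.Chars.find_nil t
        rw [this] at hfm
        have : e = 0 := hfm.symm
        subst this
        simpa [List.length_pos_iff] using List.length_pos_of_ne_nil ht
      · have h1 := hpre.length_le
        rw [List.length_drop] at h1
        have h2 : 1 ≤ m.length := by
          rcases m with _ | _
          · exact absurd rfl hm
          · simp
        omega
    rcases hs : pvScanB stops t 0 with _ | ⟨i, m'⟩
    · exfalso
      exact (iffnone.mp hs) e.toNat (by omega) hlt st0 hst0 (by rw [hst0e]; exact hpre)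
    · obtain ⟨a1, a2, a3, a4⟩ := hsome i m' hs
      have hie : i ≤ e.toNat := by
        by_contra hcon
        exact a4 e.toNat (by omega) (by omega) st0 hst0 (by rw [hst0e]; exact hpre)
      rcases hf' : stops.find? (fun st => PySem.Chars.startswith (t.drop i) st.toList) with _ | st'
      · rw [hf'] at a3; exact absurd a3 (by simp)
      · rw [hf'] at a3
        have hm' : m' = st'.toList := by
          simpa using a3.symm
        have hsw := List.find?_some hf'
        rw [PySem.Chars.startswith_iff] at hsw
        have hm'pre : m' <+: t.drop i := by rw [hm']; exact hsw
        have hm'mem : m' ∈ stops.map String.toList := by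
          rw [hm']; exact List.mem_map_of_mem (List.mem_of_find?_eq_some hf')
        have hfm'0 : 0 ≤ PySem.Chars.find t m' := by
          rw [PySem.Chars.find_nonneg_iff]
          exact hm'pre.isInfix.trans (List.drop_suffix i t).isInfix
        obtain ⟨_, hmin'⟩ := PySem.Chars.find_spec hfm'0
        have hfind_le : (PySem.Chars.find t m').toNat ≤ i := by
          by_contra hcon
          exact hmin' i (by omega) hm'pre
        have hbnd := hbound m' hm'mem
        have hei : (i : Int) = e := by omega
        have hie2 : i = e.toNat := by omega
        -- the two "first match" predicates agree on every element
        have hcongr : (stops.map String.toList).find?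
              (fun c => PySem.Chars.startswith (t.drop i) c)
            = (stops.map String.toList).find? (fun c => decide (PySem.Chars.find t c = e)) := by
          apply pvFindCongr
          intro c hc
          rw [Bool.eq_iff_iff, PySem.Chars.startswith_iff, decide_eq_true_eq]
          constructor
          · intro hcp
            have hc0 : 0 ≤ PySem.Chars.find t c := by
              rw [PySem.Chars.find_nonneg_iff]
              exact hcp.isInfix.trans (List.drop_suffix i t).isInfix
            obtain ⟨_, hminc⟩ := PySem.Chars.find_spec hc0
            have h5 : (PySem.Chars.find t c).toNat ≤ i := by
              by_contra hcon
              exact hminc i (by omega) hcp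
            rcases hbound c hc with hx | hx
            · omega
            · omega
          · intro hcf
            have hc0 : 0 ≤ PySem.Chars.find t c := by rw [hcf]; exact he0
            obtain ⟨hcp, _⟩ := PySem.Chars.find_spec hc0
            rw [hcf] at hcp
            rw [hie2]
            exact hcp
        have hmap : (stops.map String.toList).find?
            (fun c => PySem.Chars.startswith (t.drop i) c) = some m' := by
          rw [List.find?_map]
          have : ((fun c => PySem.Chars.startswith (t.drop i) c) ∘ String.toList)
              = (fun st => PySem.Chars.startswith (t.drop i) st.toList) := rfl
          rw [this, hf', hm']
          rfl
        rw [hcongr, hfind] at hmap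
        have : m = m' := by simpa using hmap
        rw [hie2, this]
        exact ⟨rfl, by omega⟩

-- ===== VERDICT (by name: the statement is the Claim_ definition above) =====
theorem split_stop_strings_py_spec : Claim_equal_split_stop_strings_py := by
  unfold Claim_equal_split_stop_strings_py Spec_split_stop_strings_py
  intro text stops _
  by_cases hg : text.toList = [] ∨ stops = []
  · simp only [split_stop_strings_py, split_stop_strings_py_alt, if_pos hg]
  · simp only [split_stop_strings_py, split_stop_strings_py_alt, if_neg hg]
    push_neg at hg
    obtain ⟨ht, hs⟩ := hg
    rw [pvFoldA_eq_best]
    obtain ⟨br1, br2⟩ := pvBridge1 stops text.toList ht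
    rcases hb : (pvBest text.toList (stops.map String.toList)).1 with _ | e
    · -- no full match: both fall through to the holdback phase
      simp only [hb, br1 hb]
      obtain ⟨s1, s2, s3⟩ := pvFoldHold_spec text.toList (stops.map String.toList) 0 le_rfl
      set t := text.toList with htdef
      set L := stops.map String.toList with hLdef
      set H := L.foldl (fun h stop => pvInnerA t stop h
        (PySem.List.pyRange (min (t.length : Int) ((stop.length : Int) - 1)) 0 (-1))) 0 with hHdef
      set cap := min (t.length : Int)
        (PySem.List.maxD (stops.map (fun s => (s.toList.length : Int))) id 0 - 1) with hcapdef
      have hminle : ∀ c ∈ L, min (t.length : Int) ((c.length : Int) - 1) ≤ cap := by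
        intro c hc
        obtain ⟨s', hs', rfl⟩ := List.mem_map.mp hc
        have hle : (s'.toList.length : Int) ≤
            PySem.List.maxD (stops.map (fun s => (s.toList.length : Int))) id 0 :=
          pvLeMaxD _ _ (List.mem_map_of_mem hs')
        omega
      by_cases hcap : cap ≤ 0
      · rw [pvRange_desc_nonpos _ hcap]
        have hH0 : H = 0 := by
          rcases s2 with h0 | ⟨Hpos, c, hcL, hbnd, _⟩
          · exact h0
          · have := hminle c hcL
            omega
        rw [if_neg (by omega)]
        rfl
      · have hcap' : 0 < cap := by omega
        have hcapeq : PySem.List.pyRange cap 0 (-1) = pvDesc cap.toNat := by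
          rw [← pvRange_desc, Int.toNat_of_nonneg (by omega)]
        rw [hcapeq]
        have hcapt : cap ≤ (t.length : Int) := by omega
        rcases hB : pvHoldB t stops (pvDesc cap.toNat) with _ | h
        · simp only [hB]
          have hH0 : H = 0 := by
            by_contra hcon
            rcases s2 with h0 | ⟨Hpos, c, hcL, hbnd, hP⟩
            · exact hcon h0
            · have hHcap : H ≤ cap := le_trans hbnd (hminle c hcL)
              have hHt : H ≤ (t.length : Int) := by
                have := hminle c hcL
                omega
              have hcast : ((H.toNat : Nat) : Int) = H := Int.toNat_of_nonneg (by omega)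
              have hany := pvHoldB_none t stops cap.toNat hB H.toNat (by omega) (by omega)
              have htrue := (pvAny_iff t stops H.toNat (by omega) (by omega)).mpr
                ⟨c, hcL, by omega, by rw [hcast]; exact hP⟩
              rw [hany] at htrue
              exact absurd htrue (by simp)
          rw [if_neg (by omega)]
        · simp only [hB]
          obtain ⟨b1, b2, b3, b4⟩ := pvHoldB_some t stops cap.toNat h hB
          have hhcap : h ≤ cap := by omega
          have hht : h ≤ (t.length : Int) := le_trans hhcap hcapt
          have hcast : ((h.toNat : Nat) : Int) = h := Int.toNat_of_nonneg (by omega)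
          rw [← hcast] at b3
          rw [pvAny_iff t stops h.toNat (by omega) (by omega)] at b3
          obtain ⟨c, hcL, hclen, hcend⟩ := b3
          have hle1 : h ≤ H := by
            have := s3 c hcL h.toNat (by omega) (by omega) hcend
            omega
          have hle2 : H ≤ h := by
            by_contra hcon
            push_neg at hcon
            have Hpos : 0 < H := by omega
            rcases s2 with h0 | ⟨_, c', hcL', hbnd', hP'⟩
            · omega
            · have hHcap : H ≤ cap := le_trans hbnd' (hminle c' hcL')
              have hHt : H ≤ (t.length : Int) := by
                have := hminle c' hcL'
                omega
              have hcast2 : ((H.toNat : Nat) : Int) = H := Int.toNat_of_nonneg (by omega)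
              have hfalse := b4 H.toNat (by omega) (by omega)
              have htrue := (pvAny_iff t stops H.toNat (by omega) (by omega)).mpr
                ⟨c', hcL', by omega, by rw [hcast2]; exact hP'⟩
              rw [hfalse] at htrue
              exact absurd htrue (by simp)
          have hhH : h = H := le_antisymm hle1 hle2
          rw [if_pos (by omega), hhH]
    · -- full match at the earliest position
      have hpair : pvBest text.toList (stops.map String.toList)
          = (some e, (pvBest text.toList (stops.map String.toList)).2) := by
        rw [← hb]
      obtain ⟨hscan, hcast⟩ := br2 e _ hpair
      simp only [hscan, hcast]
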